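-- pv_equiv track=rewrite | github.com/vuniem131104/Building-an-Educational-Chatbot-based-on-Knowledge-Graph | services/indexing/src/indexing/domain/chunker/utils/header_processor.py | get_parent_headers
-- ===== SOURCE A (Python) =====
-- def get_parent_headers(start_idx: int, headers: list[tuple[int, int, str]]) -> list[str]:
--     """Finds parent headers for a given header.
--
--     Args:
--         start_idx (int): The current header idx.
--         headers (list[tuple[int, int, str]]): List of parsed headers.
--     Returns:
--         list[str]: A list of parent headers, formatted as strings.
--     """
--     for idx, header in enumerate(headers):
--         if start_idx == header[0]:
--             _, current_level, _ = header
--             break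
--
--     if current_level == 1:
--         return []
--     parents: list[str] = []
--     for i in range(idx - 1, -1, -1):
--         _, level, title = headers[i]
--         if level < current_level:
--             parents.insert(0, ('#' * level + ' ' + title))
--             current_level = level
--     return parents
-- ===== SOURCE B (Python) =====
-- def get_parent_headers(start_idx: int, headers: list[tuple[int, int, str]]) -> list[str]:
--     """Forward monotonic-stack re-implementation: one left-to-right pass over the
--     headers before the matched one, instead of A's backward walk."""
--     for idx, header in enumerate(headers):
--         if start_idx == header[0]:
--             _, current_level, _ = header
--             break
--
--     if current_level == 1:
--         return []
--     stack: list[tuple[int, str]] = []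
--     for _, level, title in headers[:idx]:
--         while stack and stack[-1][0] >= level:
--             stack.pop()
--         stack.append((level, title))
--     while stack and stack[-1][0] >= current_level:
--         stack.pop()
--     return ['#' * level + ' ' + title for level, title in stack]
-- ===== Notes on version B (the rewrite author's own statement) =====
-- stated objective: alternative
-- what changed: A's backward walk over headers[idx-1..0] with a shrinking current_level threshold is replaced by a forward monotonic-stack pass over headers[:idx] (pop levels >= incoming, then pop levels >= current_level).
import Mathlib
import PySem

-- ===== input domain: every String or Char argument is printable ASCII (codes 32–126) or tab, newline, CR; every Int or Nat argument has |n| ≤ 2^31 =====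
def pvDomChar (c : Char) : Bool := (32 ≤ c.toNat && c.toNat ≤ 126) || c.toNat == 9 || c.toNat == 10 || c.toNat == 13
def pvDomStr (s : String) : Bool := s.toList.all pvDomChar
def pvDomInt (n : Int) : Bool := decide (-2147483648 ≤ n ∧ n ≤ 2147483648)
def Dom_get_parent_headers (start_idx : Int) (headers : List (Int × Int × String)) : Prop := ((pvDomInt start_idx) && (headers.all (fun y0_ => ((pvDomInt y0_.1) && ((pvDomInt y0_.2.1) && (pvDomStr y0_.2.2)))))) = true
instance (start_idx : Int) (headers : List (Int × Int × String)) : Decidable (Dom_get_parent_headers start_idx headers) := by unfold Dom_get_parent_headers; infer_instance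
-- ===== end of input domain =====

-- B replaces A's backward threshold walk by a forward monotonic stack over the prefix
-- (alternative decomposition, same cost); return values agree wherever A returns.

-- '#' * level + ' ' + title  (identical formatting expression in both Pythons; '#'*level is '' for level ≤ 0)
def pvFmt (lvl : Int) (title : String) : String :=
  String.ofList (PySem.List.pyRepeat ['#'] lvl ++ ' ' :: title.toList)

-- the first loop (identical in A and B): first (idx, level) with start_idx == header[0]
def pvFindHdr (start_idx : Int) : List (Int × Int × String) → Nat → Option (Nat × Int)
  | [], _ => none
  | h :: t, i => if start_idx = h.1 then some (i, h.2.1) else pvFindHdr start_idx t (i + 1)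

-- ===== PORT A =====
-- the index loop 'for i in range(idx-1,-1,-1): …headers[i]…' reads exactly the prefix
-- headers[:idx] from last to first, so it is rendered as a foldl over that reversed prefix
-- with state (parents, current_level); parents.insert(0, x) is cons.
def get_parent_headers (start_idx : Int) (headers : List (Int × Int × String)) : List String :=
  match pvFindHdr start_idx headers 0 with
  | none => []   -- Python raises NameError here; excluded by Pre_
  | some (idx, currentLevel) =>
    if currentLevel = 1 then []
    else
      ((headers.take idx).reverse.foldl
        (fun (st : List String × Int) h =>
          if h.2.1 < st.2 then (pvFmt h.2.1 h.2.2 :: st.1, h.2.1) else st)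
        ([], currentLevel)).1

-- ===== PORT B =====
-- 'while stack and stack[-1][0] >= lvl: stack.pop()' (pop the maximal qualifying suffix)
def popGE (lvl : Int) : List (Int × String) → List (Int × String)
  | [] => []
  | p :: rest =>
    let r := popGE lvl rest
    if r.isEmpty && lvl ≤ p.1 then [] else p :: r

def get_parent_headers_alt (start_idx : Int) (headers : List (Int × Int × String)) : List String :=
  match pvFindHdr start_idx headers 0 with
  | none => []   -- Python raises NameError here; excluded by Pre_
  | some (idx, currentLevel) =>
    if currentLevel = 1 then []
    else
      let stack := (headers.take idx).foldl
        (fun st h => popGE h.2.1 st ++ [(h.2.1, h.2.2)]) []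
      (popGE currentLevel stack).map (fun p => pvFmt p.1 p.2)

-- ===== PRECONDITION & SPEC =====
-- Pre_ excludes exactly the inputs where A (and B) raise NameError: no header with first
-- component equal to start_idx (this includes the empty list).
def Pre_get_parent_headers (start_idx : Int) (headers : List (Int × Int × String)) : Prop :=
  ∃ h ∈ headers, h.1 = start_idx
instance (start_idx : Int) (headers : List (Int × Int × String)) : Decidable (Pre_get_parent_headers start_idx headers) := by unfold Pre_get_parent_headers; infer_instance

def pvWitness_get_parent_headers : Int × (List (Int × Int × String)) :=
  (7, [(1, 1, "top"), (2, 2, "mid"), (7, 3, "leaf")])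

def Spec_get_parent_headers (start_idx : Int) (headers : List (Int × Int × String)) (out : List String) : Prop := out = get_parent_headers_alt start_idx headers
instance (start_idx : Int) (headers : List (Int × Int × String)) (out : List String) : Decidable (Spec_get_parent_headers start_idx headers out) := by unfold Spec_get_parent_headers; infer_instance

-- ===== CLAIM (what is proved, stated in full; the proofs are below) =====
def Claim_equal_get_parent_headers : Prop := ∀ (start_idx : Int) (headers : List (Int × Int × String)), Dom_get_parent_headers start_idx headers → Pre_get_parent_headers start_idx headers → Spec_get_parent_headers start_idx headers (get_parent_headers start_idx headers)

-- ===== LEMMAS AND PROOFS =====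

-- specification of A's backward walk, as a plain recursion (result in final order)
def backS : List (Int × Int × String) → Int → List String
  | [], _ => []
  | h :: t, c => if h.2.1 < c then backS t h.2.1 ++ [pvFmt h.2.1 h.2.2] else backS t c

theorem foldl_back (lst : List (Int × Int × String)) (acc : List String) (c : Int) :
    (lst.foldl (fun (st : List String × Int) h =>
        if h.2.1 < st.2 then (pvFmt h.2.1 h.2.2 :: st.1, h.2.1) else st) (acc, c)).1
      = backS lst c ++ acc := by
  induction lst generalizing acc c with
  | nil => simp [backS]
  | cons h t ih =>
    simp only [List.foldl_cons, backS]
    by_cases hc : h.2.1 < c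
    · simp [hc, ih]
    · simp [hc, ih]

theorem popGE_append_lt (c : Int) (q : Int × String) (s : List (Int × String)) (hq : q.1 < c) :
    popGE c (s ++ [q]) = s ++ [q] := by
  induction s with
  | nil => simp [popGE]; omega
  | cons p rest ih =>
    simp only [List.cons_append, popGE, ih]
    have : ¬ (rest ++ [q]).isEmpty := by simp
    simp [this]

theorem popGE_append_ge (c : Int) (q : Int × String) (s : List (Int × String)) (hq : c ≤ q.1) :
    popGE c (s ++ [q]) = popGE c s := by
  induction s with
  | nil => simp [popGE, hq]
  | cons p rest ih => simp only [List.cons_append, popGE, ih]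

theorem popGE_popGE (c a : Int) (s : List (Int × String)) (hca : c ≤ a) :
    popGE c (popGE a s) = popGE c s := by
  induction s with
  | nil => simp [popGE]
  | cons p rest ih =>
    simp only [popGE]
    by_cases h1 : ((popGE a rest).isEmpty && decide (a ≤ p.1)) = true
    · rw [if_pos h1]
      obtain ⟨he, hap⟩ : popGE a rest = [] ∧ a ≤ p.1 := by
        simpa [List.isEmpty_iff] using h1
      have hr : popGE c rest = [] := by rw [← ih, he]; simp [popGE]
      simp [popGE, hr, le_trans hca hap]
    · rw [if_neg h1]
      simp only [popGE, ih]

theorem stack_eq_back (l : List (Int × Int × String)) (c : Int) :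
    (popGE c (l.reverse.foldl (fun st h => popGE h.2.1 st ++ [(h.2.1, h.2.2)]) [])).map
        (fun p => pvFmt p.1 p.2)
      = backS l c := by
  induction l generalizing c with
  | nil => simp [popGE, backS]
  | cons h t ih =>
    simp only [List.reverse_cons, List.foldl_append, List.foldl_cons, List.foldl_nil, backS]
    by_cases hc : h.2.1 < c
    · rw [popGE_append_lt c _ _ hc, List.map_append, ih h.2.1, if_pos hc]; rfl
    · rw [popGE_append_ge c _ _ (not_lt.mp hc), popGE_popGE c h.2.1 _ (not_lt.mp hc), ih c,
        if_neg hc]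

-- ===== VERDICT (by name: the statement is the Claim_ definition above) =====
theorem get_parent_headers_spec : Claim_equal_get_parent_headers := by
  intro start_idx headers _ _
  unfold Spec_get_parent_headers get_parent_headers get_parent_headers_alt
  cases pvFindHdr start_idx headers 0 with
  | none => rfl
  | some p =>
    obtain ⟨idx, c⟩ := p
    by_cases h1 : c = 1
    · simp [h1]
    · simp only [h1, if_false]
      rw [foldl_back, List.append_nil]
      have := stack_eq_back ((headers.take idx).reverse) c
      rw [List.reverse_reverse] at this
      rw [← this]
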